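-- pv_equiv track=rewrite | github.com/greivinlopez/coding-solutions | python/leetcode/problems_2200_2299/2206_divide_array_into_equal_pairs.py | divide_array_alt
-- ===== SOURCE A (Python) =====
-- def divide_array_alt(nums):
--     # Alternative solution
--     odd_set = set()
--     for n in nums:
--         if n not in odd_set:
--             odd_set.add(n)
--         else:
--             odd_set.remove(n)
--     return len(odd_set) == 0
-- ===== SOURCE B (Python) =====
-- def divide_array_alt(nums):
--     counts = {}
--     for n in nums:
--         counts[n] = counts.get(n, 0) + 1
--     return all(c % 2 == 0 for c in counts.values())
-- ===== Notes on version B (the rewrite author's own statement) =====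
-- stated objective: idiomatic
-- what changed: A toggles elements in/out of a parity set in one branchy loop; B builds a full frequency table in one pass and then checks in a separate pass that every count is even.
import Mathlib
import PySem

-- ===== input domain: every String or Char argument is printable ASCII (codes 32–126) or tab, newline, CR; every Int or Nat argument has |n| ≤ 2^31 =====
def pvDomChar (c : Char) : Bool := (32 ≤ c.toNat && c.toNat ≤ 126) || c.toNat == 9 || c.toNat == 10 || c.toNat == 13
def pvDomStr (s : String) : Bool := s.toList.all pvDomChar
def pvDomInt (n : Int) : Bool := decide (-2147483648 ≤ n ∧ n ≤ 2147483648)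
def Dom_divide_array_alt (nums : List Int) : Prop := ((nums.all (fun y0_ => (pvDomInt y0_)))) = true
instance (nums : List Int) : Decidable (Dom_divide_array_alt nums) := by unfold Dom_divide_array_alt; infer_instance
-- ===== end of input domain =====

-- B replaces A's toggled parity set with a frequency table built in one pass,
-- then a separate pass checking every count is even (idiomatic Counter style).


-- ===== PORT A =====
-- 'odd_set.remove(n)' only runs when n ∈ odd_set, where remove = discard (no KeyError possible).
def divide_array_alt (nums : List Int) : Bool :=
  let odd_set := nums.foldl
    (fun s n => if !(PySem.Set.contains s n) then PySem.Set.add s n else PySem.Set.discard s n)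
    PySem.Set.empty
  PySem.Set.len odd_set == 0

-- ===== PORT B =====
def divide_array_alt_alt (nums : List Int) : Bool :=
  let counts := nums.foldl (fun d n => d.insert n (d.getD n 0 + 1)) PySem.Dict.empty
  counts.values.all (fun c => PySem.Int.mod c 2 == 0)

-- ===== PRECONDITION & SPEC =====
def Spec_divide_array_alt (nums : List Int) (out : Bool) : Prop := out = divide_array_alt_alt nums
instance (nums : List Int) (out : Bool) : Decidable (Spec_divide_array_alt nums out) := by unfold Spec_divide_array_alt; infer_instance

-- ===== CLAIM (what is proved, stated in full; the proofs are below) =====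
def Claim_equal_divide_array_alt : Prop := ∀ (nums : List Int), Dom_divide_array_alt nums → Spec_divide_array_alt nums (divide_array_alt nums)

-- ===== LEMMAS AND PROOFS =====

-- A's loop invariant: membership in the toggled set tracks the parity of the count seen so far.
lemma memA (nums : List Int) (s : PySem.Set Int) (hs : s.Nodup) (x : Int) :
    (x ∈ nums.foldl
      (fun s n => if !(PySem.Set.contains s n) then PySem.Set.add s n else PySem.Set.discard s n)
      s) ↔ ((x ∈ s) ↔ nums.count x % 2 = 0) := by
  induction nums generalizing s with
  | nil => simp
  | cons n rest ih =>
    simp only [List.foldl_cons]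
    by_cases hn : n ∈ s
    · have hc : PySem.Set.contains s n = true := (PySem.Set.contains_iff s n).mpr hn
      rw [show (if !(PySem.Set.contains s n) then PySem.Set.add s n else PySem.Set.discard s n)
            = PySem.Set.discard s n by simp [hn]]
      rw [ih _ (PySem.Set.nodup_discard s n hs)]
      by_cases hx : x = n
      · subst hx
        simp [PySem.Set.mem_discard, hn]
        omega
      · have hnx : (n == x) = false := by simp; exact fun h => hx h.symm
        simp [PySem.Set.mem_discard, List.count_cons, hnx, hx]
    · have hc : PySem.Set.contains s n = false := by
        simpa using hn
      rw [show (if !(PySem.Set.contains s n) then PySem.Set.add s n else PySem.Set.discard s n)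
            = PySem.Set.add s n by simp [hn]]
      rw [ih _ (PySem.Set.nodup_add s n hs)]
      by_cases hx : x = n
      · subst hx
        simp [PySem.Set.mem_add, hn]
        omega
      · have hnx : (n == x) = false := by simp; exact fun h => hx h.symm
        simp [PySem.Set.mem_add, List.count_cons, hnx, hx]

-- The two ports agree on every input: A's set is empty iff every element's count is even,
-- which is exactly what B's all-pass over the counter's values checks.
lemma ports_agree (nums : List Int) : divide_array_alt nums = divide_array_alt_alt nums := by
  unfold divide_array_alt divide_array_alt_alt
  rw [Bool.eq_iff_iff]
  simp only [PySem.Dict.foldl_insert_getD_add_one_eq_counter,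
    PySem.Dict.values_eq_map_keys _ (PySem.Dict.nodup_keys_counter nums) 0,
    PySem.Dict.keys_counter, List.all_map, List.all_eq_true, Function.comp,
    PySem.Dict.getD_counter, beq_iff_eq, PySem.Set.len, Int.natCast_eq_zero,
    List.length_eq_zero_iff, List.eq_nil_iff_forall_not_mem]
  constructor
  · intro h k hk
    have := (memA nums PySem.Set.empty List.nodup_nil k).not.mp (h k)
    have hcnt : nums.count k % 2 = 0 := by
      simpa [PySem.Set.empty] using this
    rw [PySem.Int.mod_eq_emod_of_pos (by norm_num)]
    omega
  · intro h x
    rw [memA nums PySem.Set.empty List.nodup_nil x]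
    simp only [PySem.Set.empty]
    by_cases hx : x ∈ nums
    · have := h x ((PySem.Set.mem_ofList _ _).mpr hx)
      rw [PySem.Int.mod_eq_emod_of_pos (by norm_num)] at this
      simp
      omega
    · simp [List.count_eq_zero.mpr hx]

-- ===== VERDICT (by name: the statement is the Claim_ definition above) =====
theorem divide_array_alt_spec : Claim_equal_divide_array_alt := by
  intro nums _
  exact ports_agree nums
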